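-- pv_equiv track=rewrite | github.com/jxxxxe/algorithm-in-Python | 백트래킹/1759 암호만들기.py | coperate
-- ===== SOURCE A (Python) =====
-- def coperate(list,r):
--     picked,start,result=[],0,[]
--     def recur(start):
--         if len(picked)==r and vow_count(picked,r):
--             result.append(tuple(picked))
--             return
--         for i in range(start,len(list)):
--             picked.append(list[i])
--             start+=1
--             recur(start)
--             picked.pop()
--     recur(start)
--     return result
--
-- def vow_count(list,r):
--     count=0
--     for vow in ['a','e','i','o','u']:
--         count+=list.count(vow)
--     return (count>=1 and count<=r-2)
-- ===== SOURCE B (Python) =====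
-- def coperate(list, r):
--     if r < 0:
--         return []
--     vowels = ('a', 'e', 'i', 'o', 'u')
--
--     def combos(items, k):
--         if k == 0:
--             return [()]
--         if len(items) < k:
--             return []
--         rest = items[1:]
--         return [(items[0],) + c for c in combos(rest, k - 1)] + combos(rest, k)
--
--     return [c for c in combos(list, r)
--             if 1 <= sum(c.count(v) for v in vowels) <= r - 2]
-- ===== Notes on version B (the rewrite author's own statement) =====
-- stated objective: alternative
-- what changed: A does index-based recursive backtracking on a shared mutable list and keeps extending past length r whenever the length-r vowel test fails; B generates the length-r combinations once by a take/skip structural recursion on the list and then filters them by vowel count in [1, r-2].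
import Mathlib
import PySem

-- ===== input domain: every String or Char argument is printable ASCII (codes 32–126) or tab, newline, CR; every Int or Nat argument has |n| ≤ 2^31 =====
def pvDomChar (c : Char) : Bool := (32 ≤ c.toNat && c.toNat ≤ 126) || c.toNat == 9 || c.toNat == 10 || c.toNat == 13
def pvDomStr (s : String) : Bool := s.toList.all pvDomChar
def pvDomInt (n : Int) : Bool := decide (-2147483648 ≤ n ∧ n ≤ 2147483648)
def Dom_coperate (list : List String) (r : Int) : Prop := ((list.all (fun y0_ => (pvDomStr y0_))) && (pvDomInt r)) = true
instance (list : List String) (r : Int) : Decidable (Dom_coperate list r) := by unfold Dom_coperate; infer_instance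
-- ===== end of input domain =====

-- B replaces A's index-based recursive backtracking (which keeps exploring past length r
-- when the vowel test fails) by a take/skip structural recursion generating the length-r
-- combinations once, then filtering by vowel count (objective: alternative).

-- ===== PORT A =====
-- vow_count: count = sum over ['a','e','i','o','u'] of picked.count(vow); returns 1 <= count <= r-2
def vowCount (picked : List String) : Int :=
  (["a", "e", "i", "o", "u"]).foldl (fun c v => c + (picked.count v : Int)) 0

def vowCond (picked : List String) (r : Int) : Bool :=
  1 ≤ vowCount picked && vowCount picked ≤ r - 2

-- the body of A's `recur` inlined at its call site inside its own `for` loop: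
-- for i in range(start, len(list)): picked.append(list[i]); recur(i+1); picked.pop()
-- where recur(i+1) = (if len(picked)==r and vow_count(picked,r): emit picked; return) else loop from i+1.
def loopA (list : List String) (r : Int) (picked : List String) (i : Nat) :
    List (List String) :=
  if h : i < list.length then
    (if ((picked ++ [list[i]]).length : Int) = r ∧ vowCond (picked ++ [list[i]]) r then
        [picked ++ [list[i]]]
      else loopA list r (picked ++ [list[i]]) (i + 1)) ++
    loopA list r picked (i + 1)
  else []
termination_by list.length - i

-- top-level: recur(0) with picked = [] (the same if-then-loop shape, picked = [], start = 0)
def coperate (list : List String) (r : Int) : List (List String) :=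
  if (([] : List String).length : Int) = r ∧ vowCond [] r then [[]] else loopA list r [] 0

-- ===== PORT B =====
-- combos(items,k): k==0 -> [()]; len(items)<k -> []; else take-first ++ skip-first
def combosB (items : List String) (k : Int) : List (List String) :=
  if k = 0 then [[]]
  else if (items.length : Int) < k then []
  else
    match items with
    | [] => []      -- unreachable from coperate_alt (needs k < 0; Python B never calls combos with k < 0)
    | x :: rest => (combosB rest (k - 1)).map (fun c => x :: c) ++ combosB rest k
termination_by items.length

def vowCountB (c : List String) : Int :=
  ((["a", "e", "i", "o", "u"]).map (fun v => (c.count v : Int))).sum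

def coperate_alt (list : List String) (r : Int) : List (List String) :=
  if r < 0 then []
  else (combosB list r).filter (fun c => 1 ≤ vowCountB c && vowCountB c ≤ r - 2)

-- ===== PRECONDITION & SPEC =====
def Spec_coperate (list : List String) (r : Int) (out : List (List String)) : Prop := out = coperate_alt list r
instance (list : List String) (r : Int) (out : List (List String)) : Decidable (Spec_coperate list r out) := by unfold Spec_coperate; infer_instance

-- ===== CLAIM (what is proved, stated in full; the proofs are below) =====
def Claim_equal_coperate : Prop := ∀ (list : List String) (r : Int), Dom_coperate list r → Spec_coperate list r (coperate list r)

-- ===== LEMMAS AND PROOFS =====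

theorem vowCount_eq (c : List String) : vowCount c = vowCountB c := by
  simp [vowCount, vowCountB, List.foldl, List.map, List.sum]
  ring

theorem vowCond_eq (c : List String) (r : Int) :
    vowCond c r = (1 ≤ vowCountB c && vowCountB c ≤ r - 2) := by
  simp [vowCond, vowCount_eq]

theorem combosB_nil_of_lt (items : List String) (k : Int) (hk : 1 ≤ k)
    (hl : (items.length : Int) < k) : combosB items k = [] := by
  unfold combosB
  rw [if_neg (by omega), if_pos hl]

theorem combosB_cons (x : String) (rest : List String) (k : Int) (hk : 1 ≤ k) :
    combosB (x :: rest) k =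
      (combosB rest (k - 1)).map (fun c => x :: c) ++ combosB rest k := by
  by_cases hl : ((x :: rest).length : Int) < k
  · rw [combosB_nil_of_lt _ _ hk hl]
    have hk2 : 2 ≤ k := by simp at hl; omega
    rw [combosB_nil_of_lt rest (k - 1) (by omega) (by simp at hl ⊢; omega),
        combosB_nil_of_lt rest k hk (by simp at hl ⊢; omega)]
    simp
  · conv_lhs => rw [combosB]
    rw [if_neg (by omega), if_neg hl]

-- the loop produces nothing once picked is already at least r long
theorem loopA_nil (list : List String) (r : Int) :
    ∀ n i picked, list.length - i = n → r ≤ (picked.length : Int) →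
      loopA list r picked i = [] := by
  intro n
  induction n using Nat.strong_induction_on with
  | _ n ih =>
    intro i picked hn hr
    unfold loopA
    split
    · next h =>
      have hlt : list.length - (i + 1) < n := by omega
      rw [if_neg (by simp; omega), ih _ hlt (i + 1) _ rfl (by simp; omega),
          ih _ hlt (i + 1) picked rfl hr]
      simp
    · rfl

-- main loop invariant: the loop from index i with prefix `picked` (strictly shorter than r)
-- yields exactly the vowel-filtered (picked ++ ·)-images of the combinations of the suffix
theorem loopA_eq (list : List String) (r : Int) :
    ∀ n i picked, list.length - i = n → (picked.length : Int) < r →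
      loopA list r picked i =
        ((combosB (list.drop i) (r - picked.length)).map (fun c => picked ++ c)).filter
          (fun c => vowCond c r) := by
  intro n
  induction n using Nat.strong_induction_on with
  | _ n ih =>
    intro i picked hn hr
    by_cases h : i < list.length
    · have hdrop : list.drop i = list[i] :: list.drop (i + 1) :=
        List.drop_eq_getElem_cons h
      have hlt : list.length - (i + 1) < n := by omega
      rw [hdrop, combosB_cons _ _ _ (by omega)]
      unfold loopA
      rw [dif_pos h]
      rw [List.map_append, List.filter_append, List.map_map]
      have hcomp : ((fun c => picked ++ c) ∘ fun c => list[i] :: c) =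
          (fun c => (picked ++ [list[i]]) ++ c) := by
        funext c; simp
      rw [hcomp]
      have hlen : ((picked ++ [list[i]]).length : Int) = (picked.length : Int) + 1 := by
        simp
      by_cases hk1 : (picked.length : Int) + 1 = r
      · -- the extended prefix has full length r: combos of the rest at size 0
        have h0 : r - (picked.length : Int) - 1 = 0 := by omega
        have : combosB (list.drop (i + 1)) (r - picked.length - 1) = [[]] := by
          rw [h0]; unfold combosB; simp
        rw [this]
        by_cases hv : vowCond (picked ++ [list[i]]) r
        · rw [if_pos ⟨by omega, hv⟩,
              ih _ hlt (i + 1) picked rfl hr]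
          simp [hv]
        · rw [if_neg (by intro hc; exact hv hc.2),
              loopA_nil list r _ (i + 1) _ rfl (by simp; omega),
              ih _ hlt (i + 1) picked rfl hr]
          simp [hv]
      · -- extended prefix still shorter than r: recurse on both summands
        rw [if_neg (by intro hc; omega)]
        rw [ih _ hlt (i + 1) (picked ++ [list[i]]) rfl (by omega),
            ih _ hlt (i + 1) picked rfl hr]
        have : r - ((picked ++ [list[i]]).length : Int) = r - picked.length - 1 := by
          simp; omega
        rw [this]
    · unfold loopA
      rw [dif_neg h, List.drop_eq_nil_of_le (by omega),
          combosB_nil_of_lt _ _ (by omega) (by simp; omega)]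
      simp

theorem vowCond_nil (r : Int) : vowCond [] r = false := by
  simp [vowCond, vowCount]

-- ===== VERDICT (by name: the statement is the Claim_ definition above) =====
theorem coperate_spec : Claim_equal_coperate := by
  intro list r _
  unfold Spec_coperate coperate coperate_alt
  rw [if_neg (by simp [vowCond_nil])]
  by_cases hr : r < 0
  · rw [if_pos hr, loopA_nil list r _ 0 [] rfl (by simp; omega)]
  · rw [if_neg hr]
    by_cases hr0 : r = 0
    · subst hr0
      rw [loopA_nil list 0 _ 0 [] rfl (by simp)]
      have : combosB list 0 = [[]] := by unfold combosB; simp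
      rw [this]
      simp [vowCountB]
    · rw [loopA_eq list r _ 0 [] rfl (by simp; omega)]
      simp only [List.drop_zero, List.nil_append]
      congr 1
      · funext c
        rw [vowCond_eq]
      · simp
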